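-- pv_equiv track=rewrite | github.com/davdleet/algorithms-practice | BOJ/contest/777/10/kewrycode/kewrycode.py | calc
-- ===== SOURCE A (Python) =====
-- def calc(v, N):
--     ans = []
--     ans = [0 for i in range(N)]
--     ans[0] = 1
--
--     for x in range(1, N):
--         for y in range(0, x):
--             m = 1000000000000000000  # (1e18)
--             for z in range(y, x+1):
--                 m = min(m, v[z])
--
--             ans[x] = ans[x] + ans[y] * m
--             ans[x] = ans[x] % 1000000007  # (1e9 + 7)
--     return ans
-- ===== SOURCE B (Python) =====
-- def calc(v, N):
--     MOD = 1000000007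
--     ans = [0] * N
--     ans[0] = 1
--     for x in range(1, N):
--         total = 0
--         m = v[x]
--         for y in range(x - 1, -1, -1):
--             m = min(m, v[y])
--             total += ans[y] * m
--         ans[x] = total % MOD
--     return ans
-- ===== Notes on version B (the rewrite author's own statement) =====
-- stated objective: faster
-- what changed: B drops A's innermost re-scan that recomputes min(v[y..x]) from scratch for every y by walking y downward and maintaining a running minimum, accumulating the sum and taking the modulus once per x.
import Mathlib
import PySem

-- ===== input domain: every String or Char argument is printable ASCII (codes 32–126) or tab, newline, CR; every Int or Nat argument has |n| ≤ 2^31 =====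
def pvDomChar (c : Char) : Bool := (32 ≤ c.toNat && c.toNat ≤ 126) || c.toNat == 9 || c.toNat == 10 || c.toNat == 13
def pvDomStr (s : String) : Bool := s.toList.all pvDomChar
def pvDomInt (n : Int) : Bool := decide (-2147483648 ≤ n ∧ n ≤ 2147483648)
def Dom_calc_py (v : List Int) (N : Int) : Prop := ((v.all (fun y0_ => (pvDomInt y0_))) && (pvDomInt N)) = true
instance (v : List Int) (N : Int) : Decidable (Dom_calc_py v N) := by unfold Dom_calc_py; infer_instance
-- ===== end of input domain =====

-- B replaces A's innermost re-scan min(v[y..x]) by a running minimum maintained while y walks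
-- downward, and takes the modulus once per x: O(N^2) instead of O(N^3).  Equivalence of the
-- RETURN value is proved on 1 ≤ N ≤ len v (elsewhere the Python A raises IndexError).

-- ===== PORT A =====
def calc_py (v : List Int) (N : Int) : List Int :=
  let ans : List Int := (PySem.List.pyRange 0 N 1).map (fun _ => (0 : Int))
  let ans := PySem.List.pySetD ans 0 1
  (PySem.List.pyRange 1 N 1).foldl (fun ans x =>
    (PySem.List.pyRange 0 x 1).foldl (fun ans y =>
      let m := (PySem.List.pyRange y (x + 1) 1).foldl
        (fun m z => min m (PySem.List.pyGetD v z 0)) 1000000000000000000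
      let ans := PySem.List.pySetD ans x
        (PySem.List.pyGetD ans x 0 + PySem.List.pyGetD ans y 0 * m)
      PySem.List.pySetD ans x (PySem.Int.mod (PySem.List.pyGetD ans x 0) 1000000007)) ans) ans

-- ===== PORT B =====
def calc_py_alt (v : List Int) (N : Int) : List Int :=
  let ans : List Int := List.replicate N.toNat 0
  let ans := PySem.List.pySetD ans 0 1
  (PySem.List.pyRange 1 N 1).foldl (fun ans x =>
    let st := (PySem.List.pyRange (x - 1) (-1) (-1)).foldl
      (fun (st : Int × Int) y =>
        let m := min st.2 (PySem.List.pyGetD v y 0)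
        (st.1 + PySem.List.pyGetD ans y 0 * m, m))
      ((0 : Int), PySem.List.pyGetD v x 0)
    PySem.List.pySetD ans x (PySem.Int.mod st.1 1000000007)) ans

-- ===== PRECONDITION & SPEC =====
-- Pre_ excludes exactly the inputs where A raises IndexError: N < 1 (ans[0] = 1 on an
-- empty/short list) or N > len(v) (v[z] out of range).
def Pre_calc_py (v : List Int) (N : Int) : Prop := 1 ≤ N ∧ N ≤ (v.length : Int)
instance (v : List Int) (N : Int) : Decidable (Pre_calc_py v N) := by unfold Pre_calc_py; infer_instance
def pvWitness_calc_py : List Int × Int := ([3, 1, 2], 3)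

def Spec_calc_py (v : List Int) (N : Int) (out : List Int) : Prop := out = calc_py_alt v N
instance (v : List Int) (N : Int) (out : List Int) : Decidable (Spec_calc_py v N out) := by unfold Spec_calc_py; infer_instance

-- ===== CLAIM (what is proved, stated in full; the proofs are below) =====
def Claim_equal_calc_py : Prop := ∀ (v : List Int) (N : Int), Dom_calc_py v N → Pre_calc_py v N → Spec_calc_py v N (calc_py v N)

-- ===== LEMMAS AND PROOFS =====

-- min(v[y..x]) exactly as A computes it (with A's big sentinel as the initial accumulator)
def pvMA (v : List Int) (y x : Int) : Int :=
  (PySem.List.pyRange y (x + 1) 1).foldl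
    (fun m z => min m (PySem.List.pyGetD v z 0)) 1000000000000000000

theorem pv_foldl_min_out (g : Int → Int) (l : List Int) (e a : Int) :
    l.foldl (fun m z => min m (g z)) (min e a) = min (l.foldl (fun m z => min m (g z)) e) a := by
  induction l generalizing e with
  | nil => rfl
  | cons c t ih =>
    simp only [List.foldl_cons]
    rw [min_right_comm, ih]

theorem pvMA_cons (v : List Int) (y x : Int) (h : y ≤ x) :
    pvMA v y x = min (pvMA v (y + 1) x) (PySem.List.pyGetD v y 0) := by
  unfold pvMA
  rw [PySem.List.pyRange_one_cons (by omega : y < x + 1)]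
  simp only [List.foldl_cons]
  exact pv_foldl_min_out _ _ _ _

theorem pvMA_self (v : List Int) (x : Int)
    (h : PySem.List.pyGetD v x 0 ≤ 1000000000000000000) :
    pvMA v x x = PySem.List.pyGetD v x 0 := by
  unfold pvMA
  rw [PySem.List.pyRange_one_singleton]
  simp only [List.foldl_cons, List.foldl_nil]
  omega

theorem pv_getD_setD_self (l : List Int) (x a : Int) (h0 : 0 ≤ x) (h1 : x < (l.length : Int)) :
    PySem.List.pyGetD (PySem.List.pySetD l x a) x 0 = a := by
  rw [PySem.List.pySetD_of_nonneg l a h0, PySem.List.pyGetD_of_nonneg _ 0 h0]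
  rw [List.getD_eq_getElem?_getD, List.getElem?_set_self (by omega)]
  simp

theorem pv_getD_setD_ne (l : List Int) (x y a : Int) (h0 : 0 ≤ x) (hy : 0 ≤ y) (hne : y ≠ x) :
    PySem.List.pyGetD (PySem.List.pySetD l x a) y 0 = PySem.List.pyGetD l y 0 := by
  rw [PySem.List.pySetD_of_nonneg l a h0, PySem.List.pyGetD_of_nonneg _ 0 hy,
    PySem.List.pyGetD_of_nonneg _ 0 hy]
  rw [List.getD_eq_getElem?_getD, List.getD_eq_getElem?_getD,
    List.getElem?_set_ne (by omega)]

theorem pv_setD_setD (l : List Int) (x a b : Int) (h0 : 0 ≤ x) :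
    PySem.List.pySetD (PySem.List.pySetD l x a) x b = PySem.List.pySetD l x b := by
  rw [PySem.List.pySetD_of_nonneg l a h0, PySem.List.pySetD_of_nonneg _ b h0,
    PySem.List.pySetD_of_nonneg l b h0, List.set_set]

theorem pv_setD_getD_self (l : List Int) (x : Int) (h0 : 0 ≤ x) (h1 : x < (l.length : Int)) :
    PySem.List.pySetD l x (PySem.List.pyGetD l x 0) = l := by
  rw [PySem.List.pyGetD_of_nonneg l 0 h0, PySem.List.pySetD_of_nonneg l _ h0]
  rw [List.getD_eq_getElem?_getD, List.getElem?_eq_getElem (by omega)]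
  simp

theorem pv_foldl_mod_add (t : Int → Int) (ys : List Int) :
    ∀ a : Int, ys.foldl (fun acc y => (acc + t y) % 1000000007) (a % 1000000007)
      = (a + (ys.map t).sum) % 1000000007 := by
  induction ys with
  | nil => intro a; simp
  | cons y ys ih =>
    intro a
    simp only [List.foldl_cons, List.map_cons, List.sum_cons]
    rw [Int.emod_add_emod, ih (a + t y)]
    congr 1
    ring

theorem pv_foldl_mod_add_zero (t : Int → Int) (ys : List Int) :
    ys.foldl (fun acc y => (acc + t y) % 1000000007) 0 = (ys.map t).sum % 1000000007 := by
  simpa using pv_foldl_mod_add t ys 0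

theorem pv_innerA (v : List Int) (x : Int) (ans : List Int)
    (hx0 : 0 ≤ x) (hxl : x < (ans.length : Int)) :
    ∀ (ys : List Int), (∀ y ∈ ys, 0 ≤ y ∧ y ≠ x) → ∀ a : Int,
    ys.foldl (fun ansc y =>
        let m := (PySem.List.pyRange y (x + 1) 1).foldl
          (fun m z => min m (PySem.List.pyGetD v z 0)) 1000000000000000000
        let ansc2 := PySem.List.pySetD ansc x
          (PySem.List.pyGetD ansc x 0 + PySem.List.pyGetD ansc y 0 * m)
        PySem.List.pySetD ansc2 x (PySem.List.pyGetD ansc2 x 0 % 1000000007))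
      (PySem.List.pySetD ans x a)
    = PySem.List.pySetD ans x
        (ys.foldl (fun acc y =>
          (acc + PySem.List.pyGetD ans y 0 * pvMA v y x) % 1000000007) a) := by
  intro ys
  induction ys with
  | nil => intro _ a; rfl
  | cons y ys ih =>
    intro hys a
    obtain ⟨hy0, hyx⟩ := hys y (List.mem_cons_self)
    simp only [List.foldl_cons]
    rw [pv_getD_setD_self ans x a hx0 hxl, pv_getD_setD_ne ans x y a hx0 hy0 hyx,
      pv_setD_setD ans x _ _ hx0, pv_getD_setD_self ans x _ hx0 hxl,
      pv_setD_setD ans x _ _ hx0]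
    exact ih (fun y hy => hys y (List.mem_cons_of_mem _ hy)) _

theorem pv_innerB (v ans : List Int) (x : Int) :
    ∀ (k : Nat) (y0 : Int), y0 + 1 = (k : Int) → -1 ≤ y0 → y0 < x → ∀ (s mi : Int),
    mi = pvMA v (y0 + 1) x →
    ((PySem.List.pyRange y0 (-1) (-1)).foldl
        (fun (st : Int × Int) y =>
          let m := min st.2 (PySem.List.pyGetD v y 0)
          (st.1 + PySem.List.pyGetD ans y 0 * m, m)) (s, mi)).1
      = s + ((PySem.List.pyRange 0 (y0 + 1) 1).map
          (fun y => PySem.List.pyGetD ans y 0 * pvMA v y x)).sum := by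
  intro k
  induction k with
  | zero =>
    intro y0 h1 _ _ s mi _
    rw [PySem.List.pyRange_neg_one_eq_nil (by omega), PySem.List.pyRange_one_eq_nil (by omega)]
    simp
  | succ k ih =>
    intro y0 h1 h2 h3 s mi hmi
    have hy0 : (0 : Int) ≤ y0 := by omega
    rw [PySem.List.pyRange_neg_one_cons (by omega : (-1 : Int) < y0)]
    simp only [List.foldl_cons]
    have hm : min mi (PySem.List.pyGetD v y0 0) = pvMA v y0 x := by
      rw [hmi, ← pvMA_cons v y0 x (by omega)]
    rw [hm, ih (y0 - 1) (by omega) (by omega) (by omega) _ _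
      (by rw [show y0 - 1 + 1 = y0 by ring])]
    rw [show y0 - 1 + 1 = y0 by ring,
      PySem.List.pyRange_one_succ_right (by omega : (0 : Int) ≤ y0)]
    simp only [List.map_append, List.sum_append, List.map_cons, List.map_nil,
      List.sum_cons, List.sum_nil]
    ring

theorem pv_step_eq (v : List Int) (N : Int)
    (hb : ∀ z ∈ v, z ≤ 1000000000000000000) (hNlen : N ≤ (v.length : Int))
    (x : Int) (hx : 1 ≤ x) (hxN : x < N)
    (ans : List Int) (hlen : (ans.length : Int) = N)
    (h0 : PySem.List.pyGetD ans x 0 = 0) :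
    ((PySem.List.pyRange 0 x 1).foldl (fun ansc y =>
        let m := (PySem.List.pyRange y (x + 1) 1).foldl
          (fun m z => min m (PySem.List.pyGetD v z 0)) 1000000000000000000
        let ansc2 := PySem.List.pySetD ansc x
          (PySem.List.pyGetD ansc x 0 + PySem.List.pyGetD ansc y 0 * m)
        PySem.List.pySetD ansc2 x (PySem.List.pyGetD ansc2 x 0 % 1000000007)) ans)
    = PySem.List.pySetD ans x
        (((PySem.List.pyRange (x - 1) (-1) (-1)).foldl
            (fun (st : Int × Int) y =>
              let m := min st.2 (PySem.List.pyGetD v y 0)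
              (st.1 + PySem.List.pyGetD ans y 0 * m, m))
            ((0 : Int), PySem.List.pyGetD v x 0)).1 % 1000000007) := by
  have hx0 : (0 : Int) ≤ x := by omega
  have hxl : x < (ans.length : Int) := by omega
  have hvx : PySem.List.pyGetD v x 0 ≤ 1000000000000000000 :=
    hb _ (PySem.List.pyGetD_mem v 0 (by constructor <;> omega))
  conv_lhs => rw [show ans = PySem.List.pySetD ans x 0 by
    rw [← h0]; exact (pv_setD_getD_self ans x hx0 hxl).symm]
  rw [pv_innerA v x ans hx0 hxl (PySem.List.pyRange 0 x 1)
    (fun y hy => by rw [PySem.List.mem_pyRange_one] at hy; exact ⟨hy.1, by omega⟩) 0]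
  rw [pv_foldl_mod_add_zero (fun y => PySem.List.pyGetD ans y 0 * pvMA v y x)]
  rw [pv_innerB v ans x x.toNat (x - 1) (by omega) (by omega) (by omega) 0
    (PySem.List.pyGetD v x 0) (by rw [show x - 1 + 1 = x by ring, pvMA_self v x hvx])]
  rw [show x - 1 + 1 = x by ring]
  simp

theorem pv_outer (v : List Int) (N : Int)
    (hb : ∀ z ∈ v, z ≤ 1000000000000000000) (hNlen : N ≤ (v.length : Int)) :
    ∀ (k : Nat) (x0 : Int) (ans : List Int), (N - x0).toNat = k → 1 ≤ x0 →
    (ans.length : Int) = N →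
    (∀ j, x0 ≤ j → j < N → PySem.List.pyGetD ans j 0 = 0) →
    (PySem.List.pyRange x0 N 1).foldl (fun ansc x =>
      (PySem.List.pyRange 0 x 1).foldl (fun ansc y =>
        let m := (PySem.List.pyRange y (x + 1) 1).foldl
          (fun m z => min m (PySem.List.pyGetD v z 0)) 1000000000000000000
        let ansc2 := PySem.List.pySetD ansc x
          (PySem.List.pyGetD ansc x 0 + PySem.List.pyGetD ansc y 0 * m)
        PySem.List.pySetD ansc2 x (PySem.List.pyGetD ansc2 x 0 % 1000000007)) ansc) ans
    = (PySem.List.pyRange x0 N 1).foldl (fun ansc x =>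
        let st := (PySem.List.pyRange (x - 1) (-1) (-1)).foldl
          (fun (st : Int × Int) y =>
            let m := min st.2 (PySem.List.pyGetD v y 0)
            (st.1 + PySem.List.pyGetD ansc y 0 * m, m))
          ((0 : Int), PySem.List.pyGetD v x 0)
        PySem.List.pySetD ansc x (st.1 % 1000000007)) ans := by
  intro k
  induction k with
  | zero =>
    intro x0 ans hk _ _ _
    rw [PySem.List.pyRange_one_eq_nil (by omega)]
    rfl
  | succ k ih =>
    intro x0 ans hk hx0 hlen hinv
    have hx0N : x0 < N := by omega
    rw [PySem.List.pyRange_one_cons hx0N]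
    simp only [List.foldl_cons]
    rw [pv_step_eq v N hb hNlen x0 hx0 hx0N ans hlen (hinv x0 le_rfl hx0N)]
    apply ih (x0 + 1)
    · omega
    · omega
    · simp only [PySem.List.length_pySetD]; exact hlen
    · intro j hj1 hj2
      rw [pv_getD_setD_ne ans x0 j _ (by omega) (by omega) (by omega)]
      exact hinv j (by omega) hj2

-- ===== VERDICT (by name: the statement is the Claim_ definition above) =====
theorem calc_py_spec : Claim_equal_calc_py := by
  intro v N hdom hpre
  obtain ⟨hN1, hNlen⟩ := hpre
  unfold Dom_calc_py at hdom
  simp only [Bool.and_eq_true, List.all_eq_true, pvDomInt, decide_eq_true_eq] at hdom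
  have hb : ∀ z ∈ v, z ≤ 1000000000000000000 := fun z hz => by
    have := hdom.1 z hz; omega
  show calc_py v N = calc_py_alt v N
  unfold calc_py calc_py_alt
  simp only [show ∀ a : Int, PySem.Int.mod a 1000000007 = a % 1000000007 from
    fun a => PySem.Int.mod_eq_emod_of_pos (by norm_num)]
  have hinit : (PySem.List.pyRange 0 N 1).map (fun _ => (0 : Int))
      = List.replicate N.toNat 0 := by
    rw [PySem.List.pyRange_one, List.map_map]
    rw [show ((fun _ => (0 : Int)) ∘ fun k : Nat => 0 + (k : Int)) = fun _ => (0 : Int) from rfl]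
    rw [List.map_const', List.length_range]
    congr 1
    omega
  rw [hinit]
  apply pv_outer v N hb hNlen (N - 1).toNat 1 _ rfl le_rfl
  · rw [PySem.List.length_pySetD]; simp; omega
  · intro j hj1 hj2
    rw [pv_getD_setD_ne _ 0 j 1 le_rfl (by omega) (by omega),
      PySem.List.pyGetD_of_nonneg _ 0 (by omega)]
    rw [List.getD_eq_getElem?_getD]
    rcases lt_or_ge j.toNat N.toNat with h | h
    · rw [List.getElem?_eq_getElem (by simpa using h)]
      simp
    · rw [List.getElem?_eq_none (by simpa using h)]
      rfl
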